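-- pv_equiv track=rewrite | github.com/waytoocool/ESG-learning | app/services/user_v2/dimensional_data_service.py | generate_dimension_combinations
-- ===== SOURCE A (Python) =====
-- from typing import Dict, List, Any, Tuple, Optional
-- import itertools
--
-- def generate_dimension_combinations(dimension_data: Dict[str, List[Dict]]) -> List[Dict]:
--     """
--     Generate all possible combinations of dimension values.
--
--     Args:
--         dimension_data: Dictionary of dimension names to their values
--
--     Returns:
--         List of all dimension combinations
--     """
--     if not dimension_data:
--         return []
--
--     # Extract dimension names and values
--     dimension_names = list(dimension_data.keys())
--     dimension_value_lists = [dimension_data[dim] for dim in dimension_names]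
--
--     # Generate all combinations using Cartesian product
--     combinations = []
--     for combo in itertools.product(*dimension_value_lists):
--         combination = {}
--         for i, dim_name in enumerate(dimension_names):
--             combination[dim_name] = combo[i]['value']
--         combinations.append(combination)
--
--     return combinations
-- ===== SOURCE B (Python) =====
-- def generate_dimension_combinations(dimension_data):
--     """Cartesian product of dimension values by an incremental fold over the
--     dimensions instead of itertools.product over pre-extracted value lists."""
--     if not dimension_data:
--         return []
--     if any(not values for values in dimension_data.values()):
--         return []  # some dimension has no values: the product is empty
--     result = [{}]
--     for name, values in dimension_data.items():
--         result = [{**partial, name: v['value']} for partial in result for v in values]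
--     return result
-- ===== Notes on version B (the rewrite author's own statement) =====
-- stated objective: alternative
-- what changed: Replaces itertools.product over pre-extracted value lists (plus an indexed enumerate loop rebuilding each combo dict) by a single incremental fold: result starts as a list holding one empty partial dict and each dimension extends every partial with each of its values, after an early empty return when some dimension has no values.
-- outside the precondition, e.g. on generate_dimension_combinations({'d': [{'value': '1'}, {}]}): A raises KeyError, B raises KeyError
import Mathlib
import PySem

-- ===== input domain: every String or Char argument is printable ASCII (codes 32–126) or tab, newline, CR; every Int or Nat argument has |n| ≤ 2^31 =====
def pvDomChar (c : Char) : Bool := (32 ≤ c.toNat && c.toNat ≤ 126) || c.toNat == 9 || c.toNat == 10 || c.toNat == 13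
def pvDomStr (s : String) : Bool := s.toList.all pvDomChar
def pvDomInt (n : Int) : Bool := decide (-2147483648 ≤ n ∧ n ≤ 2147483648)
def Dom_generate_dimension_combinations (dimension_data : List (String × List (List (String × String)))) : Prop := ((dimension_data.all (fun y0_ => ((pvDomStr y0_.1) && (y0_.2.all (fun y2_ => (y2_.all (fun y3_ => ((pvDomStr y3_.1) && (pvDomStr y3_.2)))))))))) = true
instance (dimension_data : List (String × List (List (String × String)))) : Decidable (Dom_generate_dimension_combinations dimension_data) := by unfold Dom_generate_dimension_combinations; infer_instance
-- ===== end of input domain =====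

-- B replaces itertools.product over pre-extracted value lists by an incremental fold
-- extending partial dicts dimension by dimension (alternative decomposition, same cost).


-- ===== PORT A =====
-- combo[i]['value'] / v['value']: first-match lookup of "value"; the default "" is unreachable
-- under Pre_ (which excludes the inputs on which Python raises KeyError here)
def pvValueOf (v : List (String × String)) : String :=
  (PySem.Dict.mk v).getD "value" ""

-- itertools.product(*lists): leftmost factor varies slowest
def pvProd {α : Type} : List (List α) → List (List α)
  | [] => [[]]
  | l :: ls => l.flatMap (fun x => (pvProd ls).map (fun c => x :: c))

def generate_dimension_combinations (dimension_data : List (String × List (List (String × String)))) : List (List (String × String)) :=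
  if dimension_data = [] then []
  else
    let dimension_names := dimension_data.map (·.1)
    let dimension_value_lists := dimension_names.map (fun dim => ((PySem.Dict.mk dimension_data).get? dim).getD [])
    (pvProd dimension_value_lists).map (fun combo =>
      ((PySem.List.enumerate dimension_names).foldl
        (fun combination p => combination.insert p.2 (pvValueOf (PySem.List.pyGetD combo p.1 [])))
        PySem.Dict.empty).items)

-- ===== PORT B =====
def generate_dimension_combinations_alt (dimension_data : List (String × List (List (String × String)))) : List (List (String × String)) :=
  if dimension_data = [] then []
  else if dimension_data.any (fun p => p.2.isEmpty) then []
  else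
    (dimension_data.foldl
      (fun result p =>
        result.flatMap (fun part => p.2.map (fun v => part.insert p.1 (pvValueOf v))))
      [(PySem.Dict.empty : PySem.Dict String String)]).map (·.items)

-- ===== PRECONDITION & SPEC =====
-- Pre_ excludes (a) association lists (outer or inner) with duplicate keys — a Python dict literal
-- cannot represent them, so their collapse to the last binding is a representation accident — and
-- (b) inputs on which some produced combo contains a dict lacking the "value" key, where A raises
-- KeyError (no exclusion when some dimension's value list is empty: the product is empty and A returns []).
def Pre_generate_dimension_combinations (dimension_data : List (String × List (List (String × String)))) : Prop :=
  (dimension_data.map (·.1)).Nodup ∧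
  (∀ p ∈ dimension_data, ∀ v ∈ p.2, (v.map (·.1)).Nodup) ∧
  ((∃ p ∈ dimension_data, p.2 = []) ∨ ∀ p ∈ dimension_data, ∀ v ∈ p.2, "value" ∈ v.map (·.1))
instance (dimension_data : List (String × List (List (String × String)))) : Decidable (Pre_generate_dimension_combinations dimension_data) := by unfold Pre_generate_dimension_combinations; infer_instance

def pvWitness_generate_dimension_combinations : (List (String × List (List (String × String)))) :=
  [("size", [[("value", "S")], [("value", "M")]]), ("color", [[("value", "red")]])]

def Spec_generate_dimension_combinations (dimension_data : List (String × List (List (String × String)))) (out : List (List (String × String))) : Prop := out = generate_dimension_combinations_alt dimension_data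
instance (dimension_data : List (String × List (List (String × String)))) (out : List (List (String × String))) : Decidable (Spec_generate_dimension_combinations dimension_data out) := by unfold Spec_generate_dimension_combinations; infer_instance

-- ===== CLAIM (what is proved, stated in full; the proofs are below) =====
def Claim_equal_generate_dimension_combinations : Prop := ∀ (dimension_data : List (String × List (List (String × String)))), Dom_generate_dimension_combinations dimension_data → Pre_generate_dimension_combinations dimension_data → Spec_generate_dimension_combinations dimension_data (generate_dimension_combinations dimension_data)

-- ===== LEMMAS AND PROOFS =====

-- every combo produced by pvProd has one entry per factor
theorem pvProd_length {α : Type} : ∀ (ls : List (List α)), ∀ c ∈ pvProd ls, c.length = ls.length := by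
  intro ls
  induction ls with
  | nil => intro c hc; simp [pvProd] at hc; simp [hc]
  | cons l ls ih =>
    intro c hc
    simp only [pvProd, List.mem_flatMap, List.mem_map] at hc
    obtain ⟨x, -, c', hc', rfl⟩ := hc
    simp [ih c' hc']

-- a Cartesian product with an empty factor is empty
theorem pvProd_of_mem_nil {α : Type} : ∀ (ls : List (List α)), [] ∈ ls → pvProd ls = [] := by
  intro ls
  induction ls with
  | nil => intro h; simp at h
  | cons l ls ih =>
    intro h
    rcases List.mem_cons.mp h with h | h
    · simp [pvProd, ← h]
    · simp [pvProd, ih h]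

-- with nodup outer keys, looking each key back up returns that entry's own value list
theorem lists_eq_map_snd (dd : List (String × List (List (String × String))))
    (h : (dd.map (·.1)).Nodup) :
    (dd.map (·.1)).map (fun dim => ((PySem.Dict.mk dd).get? dim).getD []) = dd.map (·.2) := by
  rw [List.map_map]
  apply List.map_congr_left
  intro p hp
  have : (PySem.Dict.mk dd).get? p.1 = some p.2 :=
    PySem.Dict.get?_of_mem_items (PySem.Dict.mk dd) hp h
  simp [Function.comp, this]

-- A's enumerate-and-index loop is the zip loop, for combos of the right length
theorem foldl_enum_pyGetD (f : PySem.Dict String String → String → List (String × String) → PySem.Dict String String) :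
    ∀ (names : List String) (pre combo : List (List (String × String)))
      (d : PySem.Dict String String), names.length = combo.length →
    (PySem.List.enumerate names (pre.length : Int)).foldl
        (fun acc p => f acc p.2 (PySem.List.pyGetD (pre ++ combo) p.1 []))
        d
      = (names.zip combo).foldl (fun acc q => f acc q.1 q.2) d := by
  intro names
  induction names with
  | nil => intro pre combo d h; simp [PySem.List.enumerate]
  | cons x xs ih =>
    intro pre combo d h
    match combo with
    | [] => simp at h
    | c :: cs =>
      simp only [PySem.List.enumerate, List.foldl_cons, List.zip_cons_cons]
      have hget : PySem.List.pyGetD (pre ++ c :: cs) (pre.length : Int) [] = c := by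
        rw [PySem.List.pyGetD_natCast]
        simp [List.getD]
      rw [hget]
      have hlen : ((pre.length : Int) + 1) = (((pre ++ [c]).length : Nat) : Int) := by simp
      have happ : pre ++ c :: cs = (pre ++ [c]) ++ cs := by simp
      rw [hlen, happ, ih (pre ++ [c]) cs _ (by simpa using h)]

-- B's fold over the dimensions equals the product-then-zip form, for any accumulator
theorem foldlB_eq (val : List (String × String) → String) :
    ∀ (dd : List (String × List (List (String × String))))
      (acc : List (PySem.Dict String String)),
    dd.foldl (fun result p =>
        result.flatMap (fun part => p.2.map (fun v => part.insert p.1 (val v)))) acc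
      = acc.flatMap (fun d0 => (pvProd (dd.map (·.2))).map (fun combo =>
          ((dd.map (·.1)).zip combo).foldl (fun d q => d.insert q.1 (val q.2)) d0)) := by
  intro dd
  induction dd with
  | nil => intro acc; simp [pvProd]
  | cons p dd ih =>
    intro acc
    simp only [List.foldl_cons, ih]
    simp only [pvProd, List.map_cons, List.flatMap_assoc, List.map_flatMap, List.flatMap_map,
      List.map_map]
    apply List.flatMap_congr
    intro d0 _
    apply List.flatMap_congr
    intro v _
    apply List.map_congr_left
    intro combo _
    simp

-- ===== VERDICT (by name: the statement is the Claim_ definition above) =====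
theorem generate_dimension_combinations_spec : Claim_equal_generate_dimension_combinations := by
  intro dd _ hpre
  obtain ⟨hnd, -, -⟩ := hpre
  unfold Spec_generate_dimension_combinations
  by_cases hdd : dd = []
  · simp [generate_dimension_combinations, generate_dimension_combinations_alt, hdd]
  · by_cases hemp : dd.any (fun p => p.2.isEmpty)
    · simp only [generate_dimension_combinations, generate_dimension_combinations_alt,
        if_neg hdd, hemp, if_true]
      rw [lists_eq_map_snd dd hnd]
      have : ([] : List (List (String × String))) ∈ dd.map (·.2) := by
        simp only [List.any_eq_true] at hemp
        obtain ⟨p, hp, he⟩ := hemp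
        exact List.mem_map.mpr ⟨p, hp, List.isEmpty_iff.mp he⟩
      rw [pvProd_of_mem_nil _ this]
      simp
    · have hemp' : dd.any (fun p => p.2.isEmpty) = false := Bool.eq_false_iff.mpr hemp
      simp only [generate_dimension_combinations, generate_dimension_combinations_alt,
        if_neg hdd, hemp', Bool.false_eq_true, if_false]
      rw [lists_eq_map_snd dd hnd, foldlB_eq]
      simp only [List.flatMap_cons, List.flatMap_nil, List.append_nil, List.map_map]
      apply List.map_congr_left
      intro combo hc
      have hlen : (dd.map (·.1)).length = combo.length := by
        rw [pvProd_length _ combo hc]; simp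
      have hzip := foldl_enum_pyGetD
        (fun acc name v => acc.insert name (pvValueOf v))
        (dd.map (·.1)) [] combo PySem.Dict.empty (by simpa using hlen)
      simp only [List.nil_append, List.length_nil, Nat.cast_zero] at hzip
      rw [hzip]
      simp [Function.comp]
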